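-- pv_equiv track=rewrite | github.com/maccoss/skyline-prism | skyline_prism/gui/viewer.py | _get_peptide_column
-- ===== SOURCE A (Python) =====
-- def _get_peptide_column(columns: list[str]) -> str:
--     """Detect the peptide column name from available columns."""
--     # Priority order for peptide column names
--     candidates = ["peptide_modified", "Peptide", "peptide"]
--     for col in candidates:
--         if col in columns:
--             return col
--     # Fallback: first column containing 'peptide'
--     for col in columns:
--         if "peptide" in col.lower():
--             return col
--     return columns[0] if columns else "peptide"
-- ===== SOURCE B (Python) =====
-- _RANK = {"peptide_modified": 0, "Peptide": 1, "peptide": 2}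
--
--
-- def _get_peptide_column(columns: list[str]) -> str:
--     """Detect the peptide column name from available columns (single pass)."""
--     best = None  # (rank, name) of the best exact candidate seen so far
--     sub = None   # first column whose lowercased name contains 'peptide'
--     for col in columns:
--         r = _RANK.get(col)
--         if r is not None and (best is None or r < best[0]):
--             best = (r, col)
--         if sub is None and "peptide" in col.lower():
--             sub = col
--     if best is not None:
--         return best[1]
--     if sub is not None:
--         return sub
--     return columns[0] if columns else "peptide"
-- ===== Notes on version B (the rewrite author's own statement) =====
-- stated objective: alternative
-- what changed: Replaced A's candidate-outer membership loop plus a separate substring-fallback scan (up to four passes over columns) with a single pass over columns that keeps the minimum-rank exact match via a priority dict and the first substring match.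
import Mathlib
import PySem

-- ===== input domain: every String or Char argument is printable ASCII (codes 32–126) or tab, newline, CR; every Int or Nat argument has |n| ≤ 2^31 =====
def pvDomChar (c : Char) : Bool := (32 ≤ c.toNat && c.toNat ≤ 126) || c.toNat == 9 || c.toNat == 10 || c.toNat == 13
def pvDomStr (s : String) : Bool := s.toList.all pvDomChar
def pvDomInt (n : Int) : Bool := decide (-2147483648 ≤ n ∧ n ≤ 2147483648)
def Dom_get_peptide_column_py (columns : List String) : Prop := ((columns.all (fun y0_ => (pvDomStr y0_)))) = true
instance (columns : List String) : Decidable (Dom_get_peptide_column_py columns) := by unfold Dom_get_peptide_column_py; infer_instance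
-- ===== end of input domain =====

-- B replaces A's candidate-outer membership loop plus separate substring fallback scan
-- with a single pass over columns using a priority-rank dict (objective: alternative).

-- ===== PORT A =====
-- first candidate that is a member of columns (A's first loop with early return)
def aCandLoop : List String → List String → Option String
  | [], _ => none
  | c :: rest, columns => if c ∈ columns then some c else aCandLoop rest columns

-- first column whose lowercased name contains "peptide" (A's second loop)
def aSubLoop : List String → Option String
  | [] => none
  | c :: rest =>
      if PySem.Str.isIn "peptide" (PySem.Str.lower c) then some c else aSubLoop rest

def get_peptide_column_py (columns : List String) : String :=
  match aCandLoop ["peptide_modified", "Peptide", "peptide"] columns with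
  | some c => c
  | none =>
    match aSubLoop columns with
    | some c => c
    | none =>
      match columns with
      | c :: _ => c
      | [] => "peptide"

-- ===== PORT B =====
def pvRank : PySem.Dict String Int :=
  PySem.Dict.ofList [("peptide_modified", 0), ("Peptide", 1), ("peptide", 2)]

-- one loop body: update (best exact match by rank, first substring match)
def bStep (st : Option (Int × String) × Option String) (col : String) :
    Option (Int × String) × Option String :=
  let best := st.1
  let sub := st.2
  let r := pvRank.get? col
  let best' :=
    match r with
    | some rv =>
      match best with
      | none => some (rv, col)
      | some (b, cb) => if rv < b then some (rv, col) else some (b, cb)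
    | none => best
  let sub' :=
    match sub with
    | some s => some s
    | none => if PySem.Str.isIn "peptide" (PySem.Str.lower col) then some col else none
  (best', sub')

def get_peptide_column_py_alt (columns : List String) : String :=
  match columns.foldl bStep (none, none) with
  | (some (_, c), _) => c
  | (none, some s) => s
  | (none, none) =>
    match columns with
    | c :: _ => c
    | [] => "peptide"

-- ===== PRECONDITION & SPEC =====
def Spec_get_peptide_column_py (columns : List String) (out : String) : Prop := out = get_peptide_column_py_alt columns
instance (columns : List String) (out : String) : Decidable (Spec_get_peptide_column_py columns out) := by unfold Spec_get_peptide_column_py; infer_instance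

-- ===== CLAIM (what is proved, stated in full; the proofs are below) =====
def Claim_equal_get_peptide_column_py : Prop := ∀ (columns : List String), Dom_get_peptide_column_py columns → Spec_get_peptide_column_py columns (get_peptide_column_py columns)

-- ===== LEMMAS AND PROOFS =====

-- the exact-match rank pair contributed by one column
def pvLift (c : String) : Option (Int × String) := (pvRank.get? c).map (fun r => (r, c))

-- left-biased minimum by rank
def pvCombine : Option (Int × String) → Option (Int × String) → Option (Int × String)
  | a, none => a
  | none, b => b
  | some (ra, ca), some (rb, cb) => if rb < ra then some (rb, cb) else some (ra, ca)

-- right-fold view of the best exact match over a list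
def pvBestR : List String → Option (Int × String)
  | [] => none
  | c :: t => pvCombine (pvLift c) (pvBestR t)

theorem pvCombine_none_left (b : Option (Int × String)) : pvCombine none b = b := by
  cases b <;> rfl

theorem pvCombine_assoc (a b c : Option (Int × String)) :
    pvCombine (pvCombine a b) c = pvCombine a (pvCombine b c) := by
  rcases a with _ | ⟨ra, ca⟩ <;> rcases b with _ | ⟨rb, cb⟩ <;> rcases c with _ | ⟨rc, cc⟩ <;>
    simp [pvCombine] <;> split_ifs <;> simp [pvCombine] <;> split_ifs <;> first | rfl | omega

theorem bStep_fst (st : Option (Int × String) × Option String) (col : String) :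
    (bStep st col).1 = pvCombine st.1 (pvLift col) := by
  rcases st with ⟨best, sub⟩
  simp only [bStep, pvLift]
  rcases h : pvRank.get? col with _ | rv <;> rcases best with _ | ⟨b, cb⟩ <;>
    simp [pvCombine]

theorem fold_fst (cols : List String) :
    ∀ st : Option (Int × String) × Option String,
      (cols.foldl bStep st).1 = pvCombine st.1 (pvBestR cols) := by
  induction cols with
  | nil => intro st; cases h : st.1 <;> simp [pvBestR, pvCombine, h]
  | cons c t ih =>
    intro st
    simp only [List.foldl_cons, pvBestR]
    rw [ih, bStep_fst, pvCombine_assoc]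

theorem fold_snd (cols : List String) :
    ∀ st : Option (Int × String) × Option String,
      (cols.foldl bStep st).2 =
        match st.2 with
        | some s => some s
        | none => aSubLoop cols := by
  induction cols with
  | nil => intro st; cases h : st.2 <;> simp [h, aSubLoop]
  | cons c t ih =>
    intro st
    rcases st with ⟨best, sub⟩
    simp only [List.foldl_cons, aSubLoop]
    rw [ih]
    rcases sub with _ | s
    · simp only [bStep]
      split_ifs <;> simp
    · simp [bStep]

theorem pvRank_eq :
    pvRank = PySem.Dict.mk [("peptide_modified", (0 : Int)), ("Peptide", 1), ("peptide", 2)] := by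
  decide

theorem pvRank_get? (c : String) :
    pvRank.get? c =
      if c = "peptide_modified" then some 0
      else if c = "Peptide" then some 1
      else if c = "peptide" then some 2
      else none := by
  rw [pvRank_eq]
  by_cases h1 : c = "peptide_modified"
  · subst h1; decide
  · by_cases h2 : c = "Peptide"
    · subst h2; decide
    · by_cases h3 : c = "peptide"
      · subst h3; decide
      · simp [beq_iff_eq, Ne.symm h1, Ne.symm h2, Ne.symm h3, h1, h2, h3, PySem.Dict.get?]

theorem pvBestR_eq (cols : List String) :
    pvBestR cols =
      if "peptide_modified" ∈ cols then some ((0 : Int), "peptide_modified")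
      else if "Peptide" ∈ cols then some ((1 : Int), "Peptide")
      else if "peptide" ∈ cols then some ((2 : Int), "peptide")
      else none := by
  induction cols with
  | nil => simp [pvBestR]
  | cons c t ih =>
    simp only [pvBestR, ih, pvLift, pvRank_get?, List.mem_cons]
    by_cases h1 : c = "peptide_modified" <;> by_cases h2 : c = "Peptide" <;>
      by_cases h3 : c = "peptide" <;>
      simp_all <;> split_ifs <;> simp_all [pvCombine]

theorem aCandLoop_eq (cols : List String) :
    aCandLoop ["peptide_modified", "Peptide", "peptide"] cols =
      if "peptide_modified" ∈ cols then some "peptide_modified"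
      else if "Peptide" ∈ cols then some "Peptide"
      else if "peptide" ∈ cols then some "peptide"
      else none := by
  simp [aCandLoop]

-- ===== VERDICT (by name: the statement is the Claim_ definition above) =====
theorem get_peptide_column_py_spec : Claim_equal_get_peptide_column_py := by
  intro columns _
  unfold Spec_get_peptide_column_py
  unfold get_peptide_column_py get_peptide_column_py_alt
  have h1 : (columns.foldl bStep (none, none)).1 = pvBestR columns := by
    rw [fold_fst, pvCombine_none_left]
  have h2 : (columns.foldl bStep (none, none)).2 = aSubLoop columns := by
    rw [fold_snd]
  rw [pvBestR_eq] at h1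
  rw [aCandLoop_eq]
  rcases hst : columns.foldl bStep (none, none) with ⟨best, sub⟩
  rw [hst] at h1 h2
  simp only at h1 h2
  subst h2
  split_ifs at h1 ⊢ <;> subst h1 <;> cases h : aSubLoop columns <;>
    cases columns <;> simp [h]
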